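-- pv_equiv track=rewrite | github.com/aliekberkara/My_Python_Projects | Modular_Arithmetic/aliens_sign.py | decrypt_flag
-- ===== SOURCE A (Python) =====
-- p = 1007621497415251
--
-- def decrypt_flag(ciphertext):
--     plaintext = ''
--
--     for n in ciphertext:
--         if pow(n, (p-1)//2, p) == 1:
--             plaintext += "1"
--         else:
--             plaintext += "0"
--
--     plaintext1= ""
--
--     for i in range(1, len(plaintext), 8):
--         plaintext1 += chr(int(plaintext[i:i+7], 2))
--
--     return plaintext1
-- ===== SOURCE B (Python) =====
-- p = 1007621497415251
--
-- def decrypt_flag(ciphertext):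
--     # Single streaming pass: no intermediate bit-string, no re-slicing.
--     out = []
--     pos = 0   # position inside the current 8-bit block (bit 0 is a skipped separator)
--     val = 0   # accumulator for the 7 data bits of the current character
--     for n in ciphertext:
--         bit = 1 if pow(n, (p - 1) // 2, p) == 1 else 0
--         if pos == 0:
--             pos = 1          # separator bit: skip it
--         else:
--             val = val * 2 + bit
--             pos += 1
--             if pos == 8:
--                 out.append(chr(val))
--                 val = 0
--                 pos = 0
--     if pos > 1:              # flush a truncated final block
--         out.append(chr(val))
--     return ''.join(out)
-- ===== Notes on version B (the rewrite author's own statement) =====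
-- stated objective: alternative
-- what changed: A materializes the full '0'/'1' bit-string and then re-slices it in strided 8-bit windows with int(s,2); B is a single streaming pass that tracks a block position and shift-accumulates the 7 data bits of each character, flushing a truncated final block.
import Mathlib
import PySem

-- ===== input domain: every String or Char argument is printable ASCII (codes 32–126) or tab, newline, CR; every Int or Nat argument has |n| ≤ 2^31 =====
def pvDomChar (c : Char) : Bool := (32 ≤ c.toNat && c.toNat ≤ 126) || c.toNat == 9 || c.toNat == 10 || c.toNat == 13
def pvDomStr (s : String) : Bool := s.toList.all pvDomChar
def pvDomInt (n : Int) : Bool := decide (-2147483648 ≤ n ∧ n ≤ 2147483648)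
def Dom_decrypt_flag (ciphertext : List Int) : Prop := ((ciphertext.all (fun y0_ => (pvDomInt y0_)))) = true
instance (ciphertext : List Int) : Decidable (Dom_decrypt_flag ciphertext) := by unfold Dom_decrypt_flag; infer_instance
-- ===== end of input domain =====

-- B fuses A's two loops into one streaming pass (position/accumulator decoder, no
-- intermediate bit-string, no slicing); alternative decomposition, same return value.

-- ===== PORT A =====
-- module constant p
def pvP : Int := 1007621497415251

-- pow(b, e, m) for m > 0, by binary exponentiation exactly as CPython computes it.
-- (PySem.Int.powMod is `b ^ e % m`, which cannot be evaluated at this task's constant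
-- exponent (p-1)//2 ≈ 5·10^14; pvPowMod is proved equal to it in pvPowMod_spec below.)
def pvPowMod (b : Int) (e : Nat) (m : Int) : Int :=
  if _he : e = 0 then PySem.Int.mod 1 m
  else
    let h := pvPowMod (PySem.Int.mod (b * b) m) (e / 2) m
    if e % 2 = 1 then PySem.Int.mod (h * b) m else h
  termination_by e
  decreasing_by exact Nat.div_lt_self (Nat.pos_of_ne_zero _he) one_lt_two

def decrypt_flag (ciphertext : List Int) : String :=
  -- plaintext: the '0'/'1' bit string, built left to right
  -- pow(n, (p-1)//2, p) is PySem.Int.powMod (Nat exponent; (p-1)//2 is a positive constant)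
  let plaintext : List Char := ciphertext.foldl
    (fun acc n => if pvPowMod n ((PySem.Int.floordiv (pvP - 1) 2).toNat) pvP = 1
                  then acc ++ ['1'] else acc ++ ['0']) []
  -- int(s, 2) is PySem.Int.ofCharsBase?; it is never `none` here (each slice is a
  -- nonempty string of '0'/'1' digits, since range stops before len), so `.getD 0` is exact
  let plaintext1 : List Char := (PySem.List.pyRange 1 (PySem.List.len plaintext) 8).foldl
    (fun acc i => acc ++ [Char.ofNat ((PySem.Int.ofCharsBase?
        (PySem.List.slice plaintext (some i) (some (i + 7))) 2).getD 0).toNat]) []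
  String.ofList plaintext1

-- ===== PORT B =====
def decrypt_flag_alt (ciphertext : List Int) : String :=
  -- state = (pos, val, out): position in the current 8-bit block, accumulator, output
  let st : Int × Int × List Char := ciphertext.foldl
    (fun (s : Int × Int × List Char) n =>
      let pos := s.1
      let val := s.2.1
      let out := s.2.2
      let bit : Int := if pvPowMod n ((PySem.Int.floordiv (pvP - 1) 2).toNat) pvP = 1
                       then 1 else 0
      if pos = 0 then (1, val, out)            -- separator bit: skip
      else
        let val := val * 2 + bit
        let pos := pos + 1
        if pos = 8 then (0, 0, out ++ [Char.ofNat val.toNat])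
        else (pos, val, out))
    (0, 0, [])
  String.ofList (if st.1 > 1 then st.2.2 ++ [Char.ofNat st.2.1.toNat] else st.2.2)

-- ===== PRECONDITION & SPEC =====
def Spec_decrypt_flag (ciphertext : List Int) (out : String) : Prop := out = decrypt_flag_alt ciphertext
instance (ciphertext : List Int) (out : String) : Decidable (Spec_decrypt_flag ciphertext out) := by unfold Spec_decrypt_flag; infer_instance

-- ===== CLAIM (what is proved, stated in full; the proofs are below) =====
def Claim_equal_decrypt_flag : Prop := ∀ (ciphertext : List Int), Dom_decrypt_flag ciphertext → Spec_decrypt_flag ciphertext (decrypt_flag ciphertext)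

-- ===== LEMMAS AND PROOFS =====

lemma pvPowEmod (a n : Int) (b : Nat) : (a % n) ^ b % n = a ^ b % n := by
  induction b with
  | zero => simp
  | succ b ih =>
    rw [pow_succ, pow_succ, Int.mul_emod, ih, Int.emod_emod_of_dvd _ dvd_rfl,
        ← Int.mul_emod]

-- the hand-ported fast pow(b, e, m) is PySem's (= Python's) modular pow
lemma pvPowMod_spec : ∀ (e : Nat) (b m : Int), 0 < m →
    pvPowMod b e m = PySem.Int.powMod b e m := by
  intro e
  induction e using Nat.strong_induction_on with
  | _ e ih =>
    intro b m hm
    rw [pvPowMod]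
    by_cases he : e = 0
    · simp [he, PySem.Int.powMod, PySem.Int.mod_eq_emod_of_pos hm]
    · rw [dif_neg he]
      rw [ih (e / 2) (Nat.div_lt_self (Nat.pos_of_ne_zero he) one_lt_two) _ _ hm]
      unfold PySem.Int.powMod
      simp only [PySem.Int.mod_eq_emod_of_pos hm]
      have hsq : ((b * b) % m) ^ (e / 2) % m = b ^ (2 * (e / 2)) % m := by
        rw [pvPowEmod, ← sq, ← pow_mul]
      by_cases ho : e % 2 = 1
      · rw [if_pos ho, Int.mul_emod, Int.emod_emod_of_dvd _ dvd_rfl, hsq,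
            ← Int.mul_emod, ← pow_succ]
        congr 2
        omega
      · rw [if_neg ho, hsq]
        congr 2
        omega

-- the Legendre bit of one ciphertext element, as an Int and as a bit character
def pvBit (n : Int) : Int :=
  if PySem.Int.powMod n ((PySem.Int.floordiv (pvP - 1) 2).toNat) pvP = 1 then 1 else 0
def pvBitc (n : Int) : Char :=
  if PySem.Int.powMod n ((PySem.Int.floordiv (pvP - 1) 2).toNat) pvP = 1 then '1' else '0'

-- value of a '0'/'1' string read in base 2, from accumulator a
def pvBinvalA (a : Int) (cs : List Char) : Int :=
  cs.foldl (fun x c => x * 2 + if c = '1' then 1 else 0) a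
def pvBinval (cs : List Char) : Int := pvBinvalA 0 cs

-- the common shape of both programs: skip one bit, decode 7, recurse
def pvDecode : List Char → List Char
  | [] => []
  | _ :: t =>
    if t = [] then []
    else Char.ofNat (pvBinval (t.take 7)).toNat :: pvDecode (t.drop 7)
  termination_by l => l.length
  decreasing_by simp

lemma pvBit_fold (n : Int) :
    (if pvPowMod n ((PySem.Int.floordiv (pvP - 1) 2).toNat) pvP = 1 then (1:Int) else 0)
    = pvBit n := by
  unfold pvBit
  rw [pvPowMod_spec _ _ _ (by norm_num [pvP])]

lemma pvBitc_mem (n : Int) : pvBitc n = '0' ∨ pvBitc n = '1' := by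
  unfold pvBitc; split_ifs <;> simp

lemma pvBitc_if (n : Int) : (if pvBitc n = '1' then (1:Int) else 0) = pvBit n := by
  unfold pvBitc pvBit; split_ifs <;> simp_all

-- all '0'/'1' strings of length ≤ n
def pvEnum : Nat → List (List Char)
  | 0 => [[]]
  | n+1 => [] :: (['0','1'].flatMap fun c => (pvEnum n).map (c :: ·))

lemma mem_pvEnum : ∀ (n : Nat) (cs : List Char), cs.length ≤ n →
    (∀ c ∈ cs, c = '0' ∨ c = '1') → cs ∈ pvEnum n := by
  intro n
  induction n with
  | zero => intro cs h _; simp at h; simp [h, pvEnum]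
  | succ n ih =>
    intro cs h hc
    cases cs with
    | nil => simp [pvEnum]
    | cons c t =>
      simp only [pvEnum, List.mem_cons, List.mem_flatMap, List.mem_map]
      right
      exact ⟨c, by rcases hc c (by simp) with h' | h' <;> simp [h'],
             t, ih t (by simpa using h) (fun x hx => hc x (by simp [hx])), rfl⟩

set_option maxRecDepth 4096 in
lemma pvOfBase_eval : ∀ cs ∈ pvEnum 7, cs ≠ [] →
    PySem.Int.ofCharsBase? cs 2 = some (pvBinval cs) := by decide

-- int(s, 2) on a nonempty '0'/'1' string of length ≤ 7
lemma pvOfBase (cs : List Char) (h7 : cs.length ≤ 7) (hne : cs ≠ [])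
    (hc : ∀ c ∈ cs, c = '0' ∨ c = '1') :
    PySem.Int.ofCharsBase? cs 2 = some (pvBinval cs) :=
  pvOfBase_eval cs (mem_pvEnum 7 cs h7 hc) hne

-- range(1, m, 8) peels its first index
lemma pvRange8 (m : Nat) (h : 2 ≤ m) :
    PySem.List.pyRange 1 (m : Int) 8
    = 1 :: (PySem.List.pyRange 1 ((m - 8 : Nat) : Int) 8).map (· + 8) := by
  rw [PySem.List.pyRange_of_pos _ _ (by norm_num), PySem.List.pyRange_of_pos _ _ (by norm_num)]
  have hcount : (if (1:Int) < (m:Int) then (((m:Int) - 1 + 8 - 1) / 8).toNat else 0)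
      = (if (1:Int) < ((m - 8 : Nat) : Int) then ((((m - 8 : Nat) : Int) - 1 + 8 - 1) / 8).toNat else 0) + 1 := by
    split_ifs <;> omega
  rw [hcount, List.range_succ_eq_map]
  simp only [List.map_cons, List.map_map, Nat.cast_zero]
  norm_num
  intro a _
  ring

-- a slice one block further right is a slice of the 8-dropped list
lemma pvSliceShift (L : List Char) (x : Int) (hx : 1 ≤ x) :
    PySem.List.slice L (some (x + 8)) (some (x + 8 + 7))
    = PySem.List.slice (L.drop 8) (some x) (some (x + 7)) := by
  rw [PySem.List.slice_toNat _ (by omega) (by omega), PySem.List.slice_toNat _ (by omega) (by omega)]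
  rw [List.drop_drop]
  have h1 : (x + 8 + 7).toNat - (x + 8).toNat = 7 := by omega
  have h2 : (x + 7).toNat - x.toNat = 7 := by omega
  have h3 : (x + 8).toNat = 8 + x.toNat := by omega
  rw [h1, h2, h3]

-- A's slicing loop computes pvDecode
lemma pvFoldA : ∀ (fuel : Nat) (L init : List Char), L.length ≤ fuel →
    (∀ c ∈ L, c = '0' ∨ c = '1') →
    (PySem.List.pyRange 1 (L.length : Int) 8).foldl
      (fun acc i => acc ++ [Char.ofNat ((PySem.Int.ofCharsBase?
          (PySem.List.slice L (some i) (some (i + 7))) 2).getD 0).toNat]) init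
    = init ++ pvDecode L := by
  intro fuel
  induction fuel with
  | zero =>
    intro L init h _
    have hL : L = [] := by cases L <;> simp_all
    subst hL
    simp [PySem.List.pyRange_of_pos _ _ (show (0:Int) < 8 by norm_num), pvDecode]
  | succ fuel ih =>
    intro L init hlen hc
    match L, hlen, hc with
    | [], _, _ => simp [PySem.List.pyRange_of_pos _ _ (show (0:Int) < 8 by norm_num), pvDecode]
    | [a], _, _ => simp [PySem.List.pyRange_of_pos _ _ (show (0:Int) < 8 by norm_num), pvDecode]
    | a :: b :: t2, hlen, hc =>
      rw [pvRange8 _ (by simp)]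
      rw [List.foldl_cons, List.foldl_map]
      rw [PySem.List.foldl_congr_mem _ _
        (fun acc i => acc ++ [Char.ofNat ((PySem.Int.ofCharsBase?
          (PySem.List.slice ((a :: b :: t2).drop 8) (some i) (some (i + 7))) 2).getD 0).toNat]) _
        (by
          intro acc x hx
          have hx1 : 1 ≤ x := ((PySem.List.mem_pyRange_iff_of_pos (by norm_num) x).mp hx).1
          rw [pvSliceShift _ x hx1])]
      rw [show (((a :: b :: t2).length - 8 : Nat) : Int) = (((a :: b :: t2).drop 8).length : Int) by
        rw [List.length_drop]]
      rw [ih ((a :: b :: t2).drop 8) _ (by simp at hlen ⊢; omega)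
        (fun c hc' => hc c (List.mem_of_mem_drop hc'))]
      have hsl : PySem.List.slice (a :: b :: t2) (some 1) (some (1 + 7)) = (b :: t2).take 7 := by
        rw [PySem.List.slice_toNat _ (by norm_num) (by norm_num)]
        norm_num [show Int.toNat 8 = 8 from rfl]
      have hof : PySem.Int.ofCharsBase? ((b :: t2).take 7) 2 = some (pvBinval ((b :: t2).take 7)) :=
        pvOfBase _ (by simp) (by simp)
          (fun c hc' => hc c (List.mem_cons_of_mem a (List.mem_of_mem_take hc')))
      simp only [hsl, hof, Option.getD_some]
      rw [pvDecode]
      simp [List.append_assoc]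

-- B's final flush of a truncated block
def pvFinish (st : Int × Int × List Char) : List Char :=
  if st.1 > 1 then st.2.2 ++ [Char.ofNat st.2.1.toNat] else st.2.2

-- B's streaming decoder, on the bit characters, with explicit (pos, val) state
def pvStream : List Char → Int → Int → List Char
  | [], pos, val => if pos > 1 then [Char.ofNat val.toNat] else []
  | c :: t, pos, val =>
    if pos = 0 then pvStream t 1 val
    else if pos + 1 = 8 then
      Char.ofNat (val * 2 + (if c = '1' then 1 else 0)).toNat :: pvStream t 0 0
    else pvStream t (pos + 1) (val * 2 + (if c = '1' then 1 else 0))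

-- B's loop body tracked against pvStream
lemma pvFoldB_stream : ∀ (bs : List Int) (pos val : Int) (out : List Char),
    pvFinish
      (bs.foldl
        (fun (s : Int × Int × List Char) n =>
          let pos := s.1
          let val := s.2.1
          let out := s.2.2
          let bit : Int := if pvPowMod n ((PySem.Int.floordiv (pvP - 1) 2).toNat) pvP = 1
                           then 1 else 0
          if pos = 0 then (1, val, out)
          else
            let val := val * 2 + bit
            let pos := pos + 1
            if pos = 8 then (0, 0, out ++ [Char.ofNat val.toNat])
            else (pos, val, out))
        (pos, val, out))
    = out ++ pvStream (bs.map pvBitc) pos val := by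
  intro bs
  induction bs with
  | nil =>
    intro pos val out
    simp only [List.foldl_nil, List.map_nil, pvFinish, pvStream]
    split_ifs <;> simp
  | cons n t ihb =>
    intro pos val out
    simp only [List.foldl_cons, List.map_cons]
    by_cases hp : pos = 0
    · simp only [hp, if_pos]
      rw [ihb]
      simp [pvStream]
    · by_cases h8 : pos + 1 = 8
      · simp only [if_neg hp, if_pos h8]
        rw [ihb, pvBit_fold]
        simp [pvStream, hp, h8, pvBitc_if]
      · simp only [if_neg hp, if_neg h8]
        rw [ihb, pvBit_fold]
        simp [pvStream, hp, h8, pvBitc_if]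

-- pvStream while gathering the 7 data bits of a block (1 ≤ pos ≤ 7)
lemma pvStream_data : ∀ (cs : List Char) (pos val : Int), 1 ≤ pos → pos ≤ 7 →
    pvStream cs pos val =
      if (8 - pos).toNat ≤ cs.length then
        Char.ofNat (pvBinvalA val (cs.take (8 - pos).toNat)).toNat
          :: pvStream (cs.drop (8 - pos).toNat) 0 0
      else if pos = 1 ∧ cs = [] then []
      else [Char.ofNat (pvBinvalA val cs).toNat] := by
  intro cs
  induction cs with
  | nil =>
    intro pos val h1 h7
    have hk : ¬ (8 - pos).toNat ≤ ([] : List Char).length := by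
      simp only [List.length_nil, Nat.le_zero]; omega
    simp only [pvStream, if_neg hk, pvBinvalA, List.foldl_nil, and_true]
    split_ifs <;> first | rfl | omega
  | cons c t ihc =>
    intro pos val h1 h7
    have hp0 : ¬ pos = 0 := by omega
    by_cases h8 : pos + 1 = 8
    · have hk1 : (8 - pos).toNat = 1 := by omega
      simp only [pvStream, if_neg hp0, if_pos h8, hk1]
      simp [pvBinvalA]
    · simp only [pvStream, if_neg hp0, if_neg h8]
      rw [ihc (pos + 1) _ (by omega) (by omega)]
      have hk : (8 - pos).toNat = (8 - (pos + 1)).toNat + 1 := by omega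
      rw [hk]
      have hb : ∀ l, pvBinvalA val (c :: l) = pvBinvalA (val * 2 + (if c = '1' then 1 else 0)) l := by
        intro l; simp [pvBinvalA]
      by_cases hlen : (8 - (pos + 1)).toNat ≤ t.length
      · have : (8 - (pos + 1)).toNat + 1 ≤ (c :: t).length := by simp; omega
        simp only [if_pos hlen, if_pos this, List.take_succ_cons, List.drop_succ_cons, hb]
      · have h2 : ¬ ((8 - (pos + 1)).toNat + 1 ≤ (c :: t).length) := by simp; omega
        have h3 : ¬ (pos + 1 = 1 ∧ t = []) := by rintro ⟨h', _⟩; omega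
        have h4 : ¬ (pos = 1 ∧ c :: t = []) := by rintro ⟨_, h'⟩; cases h'
        simp only [if_neg hlen, if_neg h2, if_neg h3, if_neg h4, hb]

-- the streaming decoder from a block boundary is pvDecode
lemma pvStream_decode : ∀ (fuel : Nat) (L : List Char), L.length ≤ fuel →
    pvStream L 0 0 = pvDecode L := by
  intro fuel
  induction fuel with
  | zero =>
    intro L h
    have hL : L = [] := by cases L <;> simp_all
    subst hL
    simp [pvStream, pvDecode]
  | succ fuel ih =>
    intro L hlen
    match L, hlen with
    | [], _ => simp [pvStream, pvDecode]
    | c :: t, hlen =>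
      rw [show pvStream (c :: t) 0 0 = pvStream t 1 0 by simp [pvStream]]
      rw [pvStream_data t 1 0 (by norm_num) (by norm_num)]
      rw [pvDecode]
      have h7 : ((8:Int) - 1).toNat = 7 := by decide
      rw [h7]
      by_cases ht : t = []
      · simp [ht]
      · by_cases hlen7 : 7 ≤ t.length
        · rw [if_pos hlen7, if_neg ht,
              ih (t.drop 7) (by simp at hlen ⊢; omega)]
          rfl
        · have h2 : ¬ ((1:Int) = 1 ∧ t = []) := by simp [ht]
          rw [if_neg hlen7, if_neg h2, if_neg ht]
          rw [List.take_of_length_le (by omega), List.drop_of_length_le (by omega)]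
          rw [pvDecode]
          rfl

-- ===== VERDICT (by name: the statement is the Claim_ definition above) =====
theorem decrypt_flag_spec : Claim_equal_decrypt_flag := by
  intro c _
  unfold Spec_decrypt_flag decrypt_flag decrypt_flag_alt
  have hA : c.foldl
      (fun acc n => if pvPowMod n ((PySem.Int.floordiv (pvP - 1) 2).toNat) pvP = 1
                    then acc ++ ['1'] else acc ++ ['0']) ([] : List Char)
      = c.map pvBitc := by
    have : (fun (acc : List Char) (n : Int) =>
        if pvPowMod n ((PySem.Int.floordiv (pvP - 1) 2).toNat) pvP = 1
        then acc ++ ['1'] else acc ++ ['0'])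
        = fun acc n => acc ++ [pvBitc n] := by
      funext acc n
      unfold pvBitc
      rw [pvPowMod_spec _ _ _ (by norm_num [pvP])]
      split_ifs <;> rfl
    rw [this, PySem.List.foldl_append_singleton_eq_map]; rfl
  simp only [hA, PySem.List.len_eq]
  rw [pvFoldA (c.map pvBitc).length _ _ (le_refl _)
        (by intro ch hch; rcases List.mem_map.mp hch with ⟨n, _, rfl⟩; exact pvBitc_mem n)]
  have hB := pvFoldB_stream c 0 0 []
  rw [pvStream_decode (c.map pvBitc).length _ (le_refl _)] at hB
  unfold pvFinish at hB
  rw [hB]
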